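-- pv_equiv track=rewrite | github.com/nocarsp101/bid-guardrail | backend/app/pdf_extraction/reconciliation_contract.py | _compared_fields_from_flags
-- ===== SOURCE A (Python) =====
-- from typing import Any, Dict, List, Optional
--
-- _FLAG_TO_COMPARED_FIELD = {
--     "unit_match": "unit",
--     "unit_conflict": "unit",
--     "qty_match": "qty",
--     "qty_conflict": "qty",
-- }
--
-- def _compared_fields_from_flags(flags: List[str]) -> List[str]:
--     """Explicitly list fields that were compared, in deterministic order."""
--     seen: List[str] = []
--     for f in flags:
--         field = _FLAG_TO_COMPARED_FIELD.get(f)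
--         if field and field not in seen:
--             seen.append(field)
--     # Fixed canonical ordering: unit, then qty.
--     order = ("unit", "qty")
--     return [f for f in order if f in seen]
-- ===== SOURCE B (Python) =====
-- _FIELD_TO_FLAGS = {
--     "unit": {"unit_match", "unit_conflict"},
--     "qty": {"qty_match", "qty_conflict"},
-- }
--
-- def _compared_fields_from_flags(flags):
--     """Explicitly list fields that were compared, in deterministic order."""
--     return [field for field, fset in _FIELD_TO_FLAGS.items()
--             if any(f in fset for f in flags)]
-- ===== Notes on version B (the rewrite author's own statement) =====
-- stated objective: simpler
-- what changed: Inverts the loop nesting: instead of building a 'seen' list by scanning flags and then filtering the canonical order through it, B loops over the two canonical fields and emits each one iff any input flag belongs to that field's inverted flag set, so the intermediate 'seen' list disappears.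
import Mathlib
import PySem

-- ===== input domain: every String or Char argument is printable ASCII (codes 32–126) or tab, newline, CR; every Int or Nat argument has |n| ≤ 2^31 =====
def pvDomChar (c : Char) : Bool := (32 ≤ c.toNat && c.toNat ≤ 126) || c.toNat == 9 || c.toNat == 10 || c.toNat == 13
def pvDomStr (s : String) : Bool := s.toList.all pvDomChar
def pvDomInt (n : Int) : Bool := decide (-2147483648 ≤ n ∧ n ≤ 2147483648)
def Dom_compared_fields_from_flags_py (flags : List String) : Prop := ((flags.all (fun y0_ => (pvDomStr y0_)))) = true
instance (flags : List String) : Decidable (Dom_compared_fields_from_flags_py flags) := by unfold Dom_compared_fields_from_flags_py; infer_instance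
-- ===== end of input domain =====

-- B inverts the loop nesting (outer loop over the two canonical fields, inner membership
-- test over the flags), dropping A's intermediate `seen` list; objective: simpler.

-- ===== PORT A =====
def pvFlagToComparedField : PySem.Dict String String :=
  PySem.Dict.ofList
    [("unit_match", "unit"), ("unit_conflict", "unit"),
     ("qty_match", "qty"), ("qty_conflict", "qty")]

def compared_fields_from_flags_py (flags : List String) : List String :=
  let seen : List String :=
    flags.foldl (fun seen f =>
      match PySem.Dict.get? pvFlagToComparedField f with
      | none => seen
      | some field =>
        if field ≠ "" ∧ field ∉ seen then seen ++ [field] else seen) []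
  ["unit", "qty"].filter (fun f => decide (f ∈ seen))

-- ===== PORT B =====
def pvFieldToFlags : List (String × PySem.Set String) :=
  [("unit", PySem.Set.ofList ["unit_match", "unit_conflict"]),
   ("qty", PySem.Set.ofList ["qty_match", "qty_conflict"])]

def compared_fields_from_flags_py_alt (flags : List String) : List String :=
  pvFieldToFlags.filterMap (fun p =>
    if flags.any (fun f => PySem.Set.contains p.2 f) then some p.1 else none)

-- ===== PRECONDITION & SPEC =====
def Spec_compared_fields_from_flags_py (flags : List String) (out : List String) : Prop := out = compared_fields_from_flags_py_alt flags
instance (flags : List String) (out : List String) : Decidable (Spec_compared_fields_from_flags_py flags out) := by unfold Spec_compared_fields_from_flags_py; infer_instance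

-- ===== CLAIM (what is proved, stated in full; the proofs are below) =====
def Claim_equal_compared_fields_from_flags_py : Prop := ∀ (flags : List String), Dom_compared_fields_from_flags_py flags → Spec_compared_fields_from_flags_py flags (compared_fields_from_flags_py flags)

-- ===== LEMMAS AND PROOFS =====

-- One step of A's loop: membership in the updated `seen` list.
theorem pv_mem_step (seen : List String) (g x : String) :
    x ∈ (match PySem.Dict.get? pvFlagToComparedField g with
         | none => seen
         | some field =>
           if field ≠ "" ∧ field ∉ seen then seen ++ [field] else seen)
    ↔ x ∈ seen ∨ (PySem.Dict.get? pvFlagToComparedField g = some x ∧ x ≠ "") := by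
  cases h : PySem.Dict.get? pvFlagToComparedField g with
  | none => simp
  | some field =>
    by_cases hf : field ≠ "" ∧ field ∉ seen
    · simp only [if_pos hf, List.mem_append, List.mem_singleton]
      constructor
      · rintro (hx | rfl)
        · exact Or.inl hx
        · exact Or.inr ⟨rfl, hf.1⟩
      · rintro (hx | ⟨he, hne⟩)
        · exact Or.inl hx
        · exact Or.inr (Option.some.inj he).symm
    · simp only [if_neg hf]
      constructor
      · exact Or.inl
      · rintro (hx | ⟨he, hne⟩)
        · exact hx
        · obtain rfl := Option.some.inj he
          rcases not_and_or.mp hf with h1 | h2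
          · exact absurd hne (by simpa using h1)
          · simpa using h2

-- A's whole loop: membership in the final `seen` list.
theorem pv_mem_foldl (flags : List String) (acc : List String) (x : String) :
    x ∈ flags.foldl (fun seen f =>
      match PySem.Dict.get? pvFlagToComparedField f with
      | none => seen
      | some field =>
        if field ≠ "" ∧ field ∉ seen then seen ++ [field] else seen) acc
    ↔ x ∈ acc ∨ ∃ g ∈ flags, PySem.Dict.get? pvFlagToComparedField g = some x ∧ x ≠ "" := by
  induction flags generalizing acc with
  | nil => simp
  | cons g gs ih =>
    simp only [List.foldl_cons, ih, pv_mem_step, List.mem_cons]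
    constructor
    · rintro ((h | h) | ⟨g', hg', h⟩)
      · exact Or.inl h
      · exact Or.inr ⟨g, Or.inl rfl, h⟩
      · exact Or.inr ⟨g', Or.inr hg', h⟩
    · rintro (h | ⟨g', (rfl | hg'), h⟩)
      · exact Or.inl (Or.inl h)
      · exact Or.inl (Or.inr h)
      · exact Or.inr ⟨g', hg', h⟩

-- The dict's fibers are exactly B's inverted flag sets.
theorem pv_fiber_unit (g : String) :
    PySem.Dict.get? pvFlagToComparedField g = some "unit" ↔
      g = "unit_match" ∨ g = "unit_conflict" := by
  have hd : pvFlagToComparedField = PySem.Dict.mk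
      [("unit_match", "unit"), ("unit_conflict", "unit"),
       ("qty_match", "qty"), ("qty_conflict", "qty")] := by decide
  rw [hd]
  by_cases h1 : g = "unit_match"
  · subst h1; decide
  by_cases h2 : g = "unit_conflict"
  · subst h2; decide
  by_cases h3 : g = "qty_match"
  · subst h3; decide
  by_cases h4 : g = "qty_conflict"
  · subst h4; decide
  · have hn : List.find? (fun p => p.1 == g)
        [("unit_match", "unit"), ("unit_conflict", "unit"),
         ("qty_match", "qty"), ("qty_conflict", "qty")] = none := by
      rw [List.find?_eq_none]
      rintro ⟨k, v⟩ hk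
      fin_cases hk <;> simp only [beq_iff_eq] <;>
        first
        | exact fun h => h1 h.symm
        | exact fun h => h2 h.symm
        | exact fun h => h3 h.symm
        | exact fun h => h4 h.symm
    simp [PySem.Dict.get?, hn]; tauto

theorem pv_fiber_qty (g : String) :
    PySem.Dict.get? pvFlagToComparedField g = some "qty" ↔
      g = "qty_match" ∨ g = "qty_conflict" := by
  have hd : pvFlagToComparedField = PySem.Dict.mk
      [("unit_match", "unit"), ("unit_conflict", "unit"),
       ("qty_match", "qty"), ("qty_conflict", "qty")] := by decide
  rw [hd]
  by_cases h1 : g = "unit_match"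
  · subst h1; decide
  by_cases h2 : g = "unit_conflict"
  · subst h2; decide
  by_cases h3 : g = "qty_match"
  · subst h3; decide
  by_cases h4 : g = "qty_conflict"
  · subst h4; decide
  · have hn : List.find? (fun p => p.1 == g)
        [("unit_match", "unit"), ("unit_conflict", "unit"),
         ("qty_match", "qty"), ("qty_conflict", "qty")] = none := by
      rw [List.find?_eq_none]
      rintro ⟨k, v⟩ hk
      fin_cases hk <;> simp only [beq_iff_eq] <;>
        first
        | exact fun h => h1 h.symm
        | exact fun h => h2 h.symm
        | exact fun h => h3 h.symm
        | exact fun h => h4 h.symm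
    simp [PySem.Dict.get?, hn]; tauto

-- ===== VERDICT (by name: the statement is the Claim_ definition above) =====
theorem compared_fields_from_flags_py_spec : Claim_equal_compared_fields_from_flags_py := by
  intro flags _
  show compared_fields_from_flags_py flags = compared_fields_from_flags_py_alt flags
  unfold compared_fields_from_flags_py compared_fields_from_flags_py_alt pvFieldToFlags
  have hu : ("unit" ∈ flags.foldl (fun seen f =>
      match PySem.Dict.get? pvFlagToComparedField f with
      | none => seen
      | some field =>
        if field ≠ "" ∧ field ∉ seen then seen ++ [field] else seen) []) ↔
      flags.any (fun f => PySem.Set.contains (PySem.Set.ofList ["unit_match", "unit_conflict"]) f) = true := by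
    rw [pv_mem_foldl]
    simp only [List.not_mem_nil, false_or, pv_fiber_unit, List.any_eq_true]
    constructor
    · rintro ⟨g, hg, h, -⟩
      exact ⟨g, hg, by simp [PySem.Set.mem_ofList]; tauto⟩
    · rintro ⟨g, hg, h⟩
      refine ⟨g, hg, ?_, by decide⟩
      simpa [PySem.Set.contains_iff, PySem.Set.mem_ofList] using h
  have hq : ("qty" ∈ flags.foldl (fun seen f =>
      match PySem.Dict.get? pvFlagToComparedField f with
      | none => seen
      | some field =>
        if field ≠ "" ∧ field ∉ seen then seen ++ [field] else seen) []) ↔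
      flags.any (fun f => PySem.Set.contains (PySem.Set.ofList ["qty_match", "qty_conflict"]) f) = true := by
    rw [pv_mem_foldl]
    simp only [List.not_mem_nil, false_or, pv_fiber_qty, List.any_eq_true]
    constructor
    · rintro ⟨g, hg, h, -⟩
      exact ⟨g, hg, by simp [PySem.Set.mem_ofList]; tauto⟩
    · rintro ⟨g, hg, h⟩
      refine ⟨g, hg, ?_, by decide⟩
      simpa [PySem.Set.contains_iff, PySem.Set.mem_ofList] using h
  have hu' : decide ("unit" ∈ flags.foldl (fun seen f =>
      match PySem.Dict.get? pvFlagToComparedField f with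
      | none => seen
      | some field =>
        if field ≠ "" ∧ field ∉ seen then seen ++ [field] else seen) []) =
      flags.any (fun f => PySem.Set.contains (PySem.Set.ofList ["unit_match", "unit_conflict"]) f) := by
    rw [← Bool.decide_eq_true (b := flags.any (fun f => PySem.Set.contains (PySem.Set.ofList ["unit_match", "unit_conflict"]) f))]
    exact decide_eq_decide.mpr hu
  have hq' : decide ("qty" ∈ flags.foldl (fun seen f =>
      match PySem.Dict.get? pvFlagToComparedField f with
      | none => seen
      | some field =>
        if field ≠ "" ∧ field ∉ seen then seen ++ [field] else seen) []) =
      flags.any (fun f => PySem.Set.contains (PySem.Set.ofList ["qty_match", "qty_conflict"]) f) := by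
    rw [← Bool.decide_eq_true (b := flags.any (fun f => PySem.Set.contains (PySem.Set.ofList ["qty_match", "qty_conflict"]) f))]
    exact decide_eq_decide.mpr hq
  simp only [List.filter_cons, List.filter_nil, List.filterMap_cons, List.filterMap_nil, hu', hq']
  cases flags.any (fun f => PySem.Set.contains (PySem.Set.ofList ["unit_match", "unit_conflict"]) f) <;>
  cases flags.any (fun f => PySem.Set.contains (PySem.Set.ofList ["qty_match", "qty_conflict"]) f) <;> rfl
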